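-- pv_equiv track=rewrite | github.com/paolamoura/p1lp1 | ofuscador.py | terceiro_passo
-- ===== SOURCE A (Python) =====
-- def terceiro_passo(linha):
--     linha_obfuscada = ''
--
--     tamanho_palavra_antes_do_espaco = 0
--     for c in linha:
--         if c != ' ':
--             tamanho_palavra_antes_do_espaco += 1
--             linha_obfuscada += c
--         else:
--             linha_obfuscada += '*' * tamanho_palavra_antes_do_espaco
--             tamanho_palavra_antes_do_espaco = 0
--     return linha_obfuscada
-- ===== SOURCE B (Python) =====
-- def terceiro_passo(linha):
--     words = linha.split(' ')
--     return ''.join(w + '*' * len(w) for w in words[:-1]) + words[-1]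
-- ===== Notes on version B (the rewrite author's own statement) =====
-- stated objective: faster
-- what changed: B splits the line on single spaces and rebuilds it word-by-word (each non-final word followed by that many asterisks), instead of A's character scan with a running counter and repeated string concatenation.
import Mathlib
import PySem

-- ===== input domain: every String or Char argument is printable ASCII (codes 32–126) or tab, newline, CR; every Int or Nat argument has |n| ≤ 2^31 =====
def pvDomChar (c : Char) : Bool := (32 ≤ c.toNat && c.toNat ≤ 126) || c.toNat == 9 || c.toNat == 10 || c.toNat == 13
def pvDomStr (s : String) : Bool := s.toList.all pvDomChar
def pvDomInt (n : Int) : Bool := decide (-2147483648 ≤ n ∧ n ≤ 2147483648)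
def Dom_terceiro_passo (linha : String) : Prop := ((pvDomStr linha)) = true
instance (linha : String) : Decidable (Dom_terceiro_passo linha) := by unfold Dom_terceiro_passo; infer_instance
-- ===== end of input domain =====

-- B replaces A's character-by-character scan with an idiomatic split(' ')/join rebuild; equal output proved below.

-- ===== PORT A =====
-- literal port of A: scan the characters, keeping (length of the word seen since
-- the last space, output so far); a space flushes that many '*'s.
def terceiro_passo (linha : String) : String :=
  String.ofList
    (linha.toList.foldl
      (fun (st : Nat × List Char) c =>
        if c ≠ ' ' then (st.1 + 1, st.2 ++ [c])
        else (0, st.2 ++ List.replicate st.1 '*'))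
      (0, [])).2

-- ===== PORT B =====
-- literal port of Source B: words = linha.split(' ') is ported as List.splitOn ' '
-- (exact: Python's str.split with a one-char separator keeps empty parts, '' → ['']),
-- words[:-1] as dropLast, words[-1] as getLast! (split never returns []).
def terceiro_passo_alt (linha : String) : String :=
  let words := linha.toList.splitOn ' '
  String.ofList
    ((words.dropLast.flatMap (fun w => w ++ List.replicate w.length '*')) ++ words.getLast!)

-- ===== PRECONDITION & SPEC =====
def Spec_terceiro_passo (linha : String) (out : String) : Prop := out = terceiro_passo_alt linha
instance (linha : String) (out : String) : Decidable (Spec_terceiro_passo linha out) := by unfold Spec_terceiro_passo; infer_instance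

-- ===== CLAIM (what is proved, stated in full; the proofs are below) =====
def Claim_equal_terceiro_passo : Prop := ∀ (linha : String), Dom_terceiro_passo linha → Spec_terceiro_passo linha (terceiro_passo linha)

-- ===== LEMMAS AND PROOFS =====

-- the rest of A's scan, as a structural recursion: t = length of the word read so far
def pvG (t : Nat) : List Char → List Char
  | [] => []
  | c :: l => if c = ' ' then List.replicate t '*' ++ pvG 0 l else c :: pvG (t + 1) l

-- B's body on a word list
def pvJoin (ws : List (List Char)) : List Char :=
  (ws.dropLast.flatMap (fun w => w ++ List.replicate w.length '*')) ++ ws.getLast!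

-- B's body with the first word's asterisk run padded by t (the chars A already counted)
def pvPad (t : Nat) : List (List Char) → List Char
  | [] => []
  | [w] => w
  | w :: ws => w ++ List.replicate (t + w.length) '*' ++ pvJoin ws

theorem pvG_foldl (l : List Char) : ∀ (t : Nat) (acc : List Char),
    (l.foldl
      (fun (st : Nat × List Char) c =>
        if c ≠ ' ' then (st.1 + 1, st.2 ++ [c])
        else (0, st.2 ++ List.replicate st.1 '*'))
      (t, acc)).2 = acc ++ pvG t l := by
  induction l with
  | nil => intro t acc; simp [pvG]
  | cons c l ih =>
    intro t acc
    by_cases hc : c = ' '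
    · rw [List.foldl_cons, if_neg (by simp [hc]), ih]
      simp [pvG, hc]
    · rw [List.foldl_cons, if_pos (by simp [hc]), ih]
      simp [pvG, hc]

theorem pvSplitOn_ne_nil (l : List Char) : l.splitOn ' ' ≠ [] :=
  List.splitOnP_ne_nil _ l

theorem pvPad_zero (ws : List (List Char)) (h : ws ≠ []) : pvPad 0 ws = pvJoin ws := by
  match ws with
  | [w] => simp [pvPad, pvJoin]
  | w :: w' :: ws =>
    simp [pvPad, pvJoin, List.dropLast, List.getLast!]

theorem pvG_eq_pvPad (l : List Char) : ∀ t, pvG t l = pvPad t (l.splitOn ' ') := by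
  induction l with
  | nil => intro t; simp [pvG, List.splitOn, List.splitOnP, List.splitOnP.go, pvPad]
  | cons c l ih =>
    intro t
    by_cases hc : c = ' '
    · have hsplit : (c :: l).splitOn ' ' = [] :: l.splitOn ' ' := by
        simp [List.splitOn, List.splitOnP_cons, hc]
      rw [hsplit]
      have hne := pvSplitOn_ne_nil l
      cases hws : l.splitOn ' ' with
      | nil => exact absurd hws hne
      | cons w ws =>
        have : pvG t (c :: l) = List.replicate t '*' ++ pvG 0 l := by simp [pvG, hc]
        rw [this, ih 0, hws]
        show List.replicate t '*' ++ pvPad 0 (w :: ws) = pvPad t ([] :: w :: ws)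
        rw [pvPad_zero (w :: ws) (by simp)]
        simp [pvPad]
    · have hsplit : (c :: l).splitOn ' ' = (l.splitOn ' ').modifyHead (c :: ·) := by
        simp [List.splitOn, List.splitOnP_cons, hc]
      rw [hsplit]
      have hne := pvSplitOn_ne_nil l
      cases hws : l.splitOn ' ' with
      | nil => exact absurd hws hne
      | cons w ws =>
        have : pvG t (c :: l) = c :: pvG (t + 1) l := by simp [pvG, hc]
        rw [this, ih (t + 1), hws]
        cases ws with
        | nil => simp [pvPad]
        | cons w' ws' =>
          simp [pvPad, List.modifyHead]
          omega

-- ===== VERDICT (by name: the statement is the Claim_ definition above) =====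
theorem terceiro_passo_spec : Claim_equal_terceiro_passo := by
  intro linha _
  unfold Spec_terceiro_passo terceiro_passo terceiro_passo_alt
  rw [pvG_foldl, pvG_eq_pvPad, pvPad_zero _ (pvSplitOn_ne_nil _)]
  simp [pvJoin]
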